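-- pv_equiv track=rewrite | github.com/grapheneaffiliate/h4-polytopic-attention | solve_arc_b15.py | solve_a5f85a15
-- ===== SOURCE A (Python) =====
-- def solve_a5f85a15(grid):
--     rows, cols = len(grid), len(grid[0])
--     out = [row[:] for row in grid]
--     # Group non-zero cells by diagonal (r-c)
--     diags = {}
--     for r in range(rows):
--         for c in range(cols):
--             if grid[r][c] != 0:
--                 key = r - c
--                 if key not in diags:
--                     diags[key] = []
--                 diags[key].append((r, c))
--     # Within each diagonal, alternate: keep, 4, keep, 4, ...
--     for key, cells in diags.items():
--         cells.sort()  # sort by row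
--         for i, (r, c) in enumerate(cells):
--             if i % 2 == 1:
--                 out[r][c] = 4
--     return out
-- ===== SOURCE B (Python) =====
-- def solve_a5f85a15(grid):
--     cols = len(grid[0])
--     counts = {}
--     out = []
--     for r, row in enumerate(grid):
--         new = row[:]
--         for c in range(cols):
--             if row[c] != 0:
--                 k = r - c
--                 counts[k] = counts.get(k, 0) + 1
--                 if counts[k] % 2 == 0:
--                     new[c] = 4
--         out.append(new)
--     return out
-- ===== Notes on version B (the rewrite author's own statement) =====
-- stated objective: simpler
-- what changed: Replaced the two-phase group-by-diagonal algorithm (dict of per-diagonal cell lists, per-diagonal sort, second marking pass over the dict) with a single row-major pass keeping only a running per-diagonal count of non-zero cells, marking a cell when its post-increment count is even; row-major order already visits each diagonal sorted by row, so the list accumulation, the sort and the whole second pass disappear.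
import Mathlib
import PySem

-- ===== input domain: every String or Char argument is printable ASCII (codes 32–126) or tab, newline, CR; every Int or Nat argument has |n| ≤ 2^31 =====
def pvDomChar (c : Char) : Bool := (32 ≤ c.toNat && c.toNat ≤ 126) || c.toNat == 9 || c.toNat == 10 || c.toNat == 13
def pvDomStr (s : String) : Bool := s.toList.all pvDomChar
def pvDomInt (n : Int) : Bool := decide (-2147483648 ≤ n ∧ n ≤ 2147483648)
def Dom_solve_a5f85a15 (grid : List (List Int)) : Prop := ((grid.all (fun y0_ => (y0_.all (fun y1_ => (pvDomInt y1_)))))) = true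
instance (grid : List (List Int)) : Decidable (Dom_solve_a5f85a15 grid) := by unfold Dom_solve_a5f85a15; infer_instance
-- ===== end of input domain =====

-- B replaces A's group-by-diagonal table, per-diagonal sort and second marking pass by a
-- single row-major pass that keeps only a running per-diagonal count of non-zero cells
-- (objective: simpler — same result because row-major order visits each diagonal by row).

-- ===== PORT A =====
-- out[r][c] = 4  (list-of-lists in-place assignment; out-of-range indices cannot occur on Pre_)
def pvSet4 (out : List (List Int)) (r c : Nat) : List (List Int) :=
  out.set r ((out.getD r []).set c 4)

def solve_a5f85a15 (grid : List (List Int)) : List (List Int) :=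
  let rows := grid.length
  let cols := (grid.headD []).length    -- len(grid[0]); grid ≠ [] on Pre_
  -- out = [row[:] for row in grid]
  -- diags = {}; group non-zero cells by diagonal r-c   (grid[r][c] read via getD: in range on Pre_)
  let diags : PySem.Dict Int (List (Nat × Nat)) :=
    (List.range rows).foldl (fun d r =>
      (List.range cols).foldl (fun d c =>
        if (grid.getD r []).getD c 0 ≠ 0 then
          let key : Int := (r : Int) - (c : Int)
          let d' := if d.contains key then d else d.insert key []
          d'.modify key [] (fun l => l ++ [(r, c)])
        else d) d) PySem.Dict.empty
  -- for key, cells in diags.items(): cells.sort(); mark odd enumerate indices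
  diags.items.foldl (fun out kc =>
    let cells := PySem.List.sorted2 kc.2 (fun p => p.1) (fun p => p.2) false
    (PySem.List.enumerate cells 0).foldl (fun out ic =>
      if ic.1 % 2 == 1 then pvSet4 out ic.2.1 ic.2.2 else out) out) grid

-- ===== PORT B =====
def solve_a5f85a15_alt (grid : List (List Int)) : List (List Int) :=
  let cols := (grid.headD []).length    -- len(grid[0]); grid ≠ [] on Pre_
  -- counts = {}; out = []; for r, row in enumerate(grid): one pass, running per-diagonal counts
  let res := (PySem.List.enumerate grid 0).foldl (fun st rp =>
    let inner := (List.range cols).foldl (fun st2 (c : Nat) =>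
      if rp.2.getD c 0 ≠ 0 then
        let k : Int := rp.1 - (c : Int)
        let counts := st2.1.insert k (st2.1.getD k 0 + 1)
        (counts, if counts.getD k 0 % 2 == 0 then st2.2.set c 4 else st2.2)
      else st2) (st.1, rp.2)
    (inner.1, st.2 ++ [inner.2])) ((PySem.Dict.empty : PySem.Dict Int Int), ([] : List (List Int)))
  res.2

-- ===== PRECONDITION & SPEC =====
-- Pre_: exactly where the Python A returns: a non-empty grid whose rows all have at least
-- len(grid[0]) entries (otherwise grid[0] / grid[r][c] raises IndexError in A, and row[c] in B).
def Pre_solve_a5f85a15 (grid : List (List Int)) : Prop :=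
  grid ≠ [] ∧ ∀ row ∈ grid, (grid.headD []).length ≤ row.length
instance (grid : List (List Int)) : Decidable (Pre_solve_a5f85a15 grid) := by
  unfold Pre_solve_a5f85a15; infer_instance

def pvWitness_solve_a5f85a15 : List (List Int) := [[1, 0], [0, 2]]

def Spec_solve_a5f85a15 (grid : List (List Int)) (out : List (List Int)) : Prop :=
  out = solve_a5f85a15_alt grid
instance (grid : List (List Int)) (out : List (List Int)) : Decidable (Spec_solve_a5f85a15 grid out) := by
  unfold Spec_solve_a5f85a15; infer_instance

-- ===== CLAIM (what is proved, stated in full; the proofs are below) =====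
def Claim_equal_solve_a5f85a15 : Prop :=
  ∀ (grid : List (List Int)), Dom_solve_a5f85a15 grid → Pre_solve_a5f85a15 grid →
    Spec_solve_a5f85a15 grid (solve_a5f85a15 grid)

-- ===== LEMMAS AND PROOFS =====

-- ---- the common reference description: mark (r,c) iff its cell is non-zero and an odd
-- ---- number of non-zero cells precede it (row-major) on its diagonal r-c ----
def pvCell (grid : List (List Int)) (r c : Nat) : Int := (grid.getD r []).getD c 0
def pvKey (p : Nat × Nat) : Int := (p.1 : Int) - (p.2 : Int)
def pvRowP (grid : List (List Int)) (cols r : Nat) : List (Nat × Nat) :=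
  ((List.range cols).filter (fun c => pvCell grid r c ≠ 0)).map (fun c => (r, c))
def pvPpre (grid : List (List Int)) (cols r : Nat) : List (Nat × Nat) :=
  (List.range r).flatMap (pvRowP grid cols)
def pvPrior (grid : List (List Int)) (cols r c : Nat) : Nat :=
  (pvPpre grid cols r).countP (fun q => pvKey q == pvKey (r, c))
def pvMark (grid : List (List Int)) (cols r c : Nat) : Bool :=
  (pvCell grid r c != 0) && (pvPrior grid cols r c % 2 == 1)
def pvMrow (grid : List (List Int)) (cols r : Nat) (row : List Int) : List Int :=
  row.mapIdx (fun c v => if c < cols ∧ pvMark grid cols r c = true then 4 else v)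
def pvRef (grid : List (List Int)) : List (List Int) :=
  grid.mapIdx (fun r row => pvMrow grid (grid.headD []).length r row)

-- ---- A-side helpers ----
def pvIns (d : PySem.Dict Int (List (Nat × Nat))) (p : Nat × Nat) : PySem.Dict Int (List (Nat × Nat)) :=
  (if d.contains (pvKey p) then d else d.insert (pvKey p) []).modify (pvKey p) [] (fun l => l ++ [p])
def pvDinv (l : List (Nat × Nat)) : PySem.Dict Int (List (Nat × Nat)) :=
  ⟨(PySem.List.dedup (l.map pvKey)).map (fun k => (k, l.filter (fun q => pvKey q == k)))⟩
def pvOdd (l : List (Nat × Nat)) : List (Nat × Nat) :=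
  ((PySem.List.enumerate l 0).filter (fun ic => ic.1 % 2 == 1)).map (fun ic => ic.2)
def pvSetAll (o : List (List Int)) (U : List (Nat × Nat)) : List (List Int) :=
  U.foldl (fun o p => pvSet4 o p.1 p.2) o
def pvP (grid : List (List Int)) (cols : Nat) : List (Nat × Nat) := pvPpre grid cols grid.length
def pvU (grid : List (List Int)) (cols : Nat) : List (Nat × Nat) :=
  (PySem.List.dedup ((pvP grid cols).map pvKey)).flatMap
    (fun k => pvOdd ((pvP grid cols).filter (fun q => pvKey q == k)))

-- ---- small generic lemmas ----
theorem pv_find?_keyed_of_mem (K : List Int) (g : Int → List (Nat × Nat)) (k0 : Int) (h : k0 ∈ K) :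
    List.find? (fun q => q.1 == k0) (K.map (fun k => (k, g k))) = some (k0, g k0) := by
  induction K with
  | nil => cases h
  | cons a K ih =>
    by_cases hak : a = k0
    · subst hak; simp
    · rcases List.mem_cons.mp h with h' | h'
      · exact absurd h'.symm hak
      · simpa [List.find?, hak] using ih h'

theorem pv_find?_keyed_of_not_mem (K : List Int) (g : Int → List (Nat × Nat)) (k0 : Int) (h : k0 ∉ K) :
    List.find? (fun q => q.1 == k0) (K.map (fun k => (k, g k))) = none := by
  induction K with
  | nil => simp
  | cons a K ih =>
    have hak : a ≠ k0 := fun h' => h (h' ▸ List.mem_cons_self)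
    have : k0 ∉ K := fun h' => h (List.mem_cons_of_mem _ h')
    simpa [List.find?, hak] using ih this

-- ---- phase 1 of A: the dict is the group-by-key of the row-major non-zero cell list ----
theorem pv_dedup_append (xs : List Int) (x : Int) :
    PySem.List.dedup (xs ++ [x])
      = if x ∈ xs then PySem.List.dedup xs else PySem.List.dedup xs ++ [x] := by
  rw [PySem.List.dedup_eq_ofList, PySem.List.dedup_eq_ofList, PySem.Set.ofList_eq_foldl,
    PySem.Set.ofList_eq_foldl, List.foldl_append, List.foldl_cons, List.foldl_nil]
  show PySem.Set.add (List.foldl PySem.Set.add [] xs) x = _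
  have hadd : ∀ (s : PySem.Set Int) (y : Int),
      PySem.Set.add s y = if PySem.Set.contains s y = true then s else s ++ [y] :=
    fun _ _ => rfl
  rw [hadd]
  have hmem : (PySem.Set.contains (List.foldl PySem.Set.add [] xs) x = true) ↔ x ∈ xs := by
    rw [← PySem.Set.ofList_eq_foldl]
    constructor
    · intro h
      exact (PySem.Set.mem_ofList xs x).mp (by simpa [PySem.Set.contains] using h)
    · intro h
      simpa [PySem.Set.contains] using (PySem.Set.mem_ofList xs x).mpr h
  by_cases h : x ∈ xs
  · rw [if_pos (hmem.mpr h), if_pos h]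
  · rw [if_neg (fun hc => h (hmem.mp hc)), if_neg h]

theorem pv_dict_step (l : List (Nat × Nat)) (p : Nat × Nat) :
    pvIns (pvDinv l) p = pvDinv (l ++ [p]) := by
  by_cases hmem : pvKey p ∈ l.map pvKey
  · have hK : pvKey p ∈ PySem.List.dedup (l.map pvKey) := (PySem.List.mem_dedup _ _).mpr hmem
    have hcont : (pvDinv l).contains (pvKey p) = true := by
      simp only [PySem.Dict.contains, pvDinv, List.any_map, List.any_eq_true]
      exact ⟨pvKey p, hK, by simp⟩
    have hget : (pvDinv l).getD (pvKey p) [] = l.filter (fun q => pvKey q == pvKey p) := by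
      simp only [PySem.Dict.getD, PySem.Dict.get?, pvDinv]
      rw [pv_find?_keyed_of_mem _ _ _ hK]
      rfl
    unfold pvIns
    rw [if_pos hcont]
    show PySem.Dict.insert _ _ _ = _
    unfold PySem.Dict.insert
    rw [if_pos hcont, hget]
    unfold pvDinv
    congr 1
    show List.map _ (List.map (fun k => (k, List.filter (fun q => pvKey q == k) l))
        (PySem.List.dedup (List.map pvKey l))) = _
    rw [List.map_append, List.map_singleton, pv_dedup_append, if_pos hmem, List.map_map]
    apply List.map_congr_left
    intro k hk
    by_cases hkk : k = pvKey p
    · subst hkk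
      simp [List.filter_append]
    · have h1 : (k == pvKey p) = false := by simp [hkk]
      have h2 : (pvKey p == k) = false := by simp [Ne.symm hkk]
      simp [List.filter_append, h2]
      exact fun h => absurd h hkk
  · have hK : pvKey p ∉ PySem.List.dedup (l.map pvKey) :=
      fun h => hmem ((PySem.List.mem_dedup _ _).mp h)
    have hcont : (pvDinv l).contains (pvKey p) = false := by
      simp only [pvDinv, PySem.Dict.contains]
      rw [List.any_map, List.any_eq_false]
      intro k hk
      simp only [Function.comp_def]
      intro h
      exact hK ((beq_iff_eq.mp h) ▸ hk)
    have hd2 : ((pvDinv l).insert (pvKey p) []).items = (pvDinv l).items ++ [(pvKey p, [])] := by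
      unfold PySem.Dict.insert
      rw [if_neg (by simp [hcont])]
    have hcont2 : ((pvDinv l).insert (pvKey p) []).contains (pvKey p) = true := by
      simp [PySem.Dict.contains, hd2]
    have hitems : (pvDinv l).items = List.map (fun k => (k, List.filter (fun q => pvKey q == k) l))
        (PySem.List.dedup (List.map pvKey l)) := rfl
    have hget2 : ((pvDinv l).insert (pvKey p) []).getD (pvKey p) [] = [] := by
      simp only [PySem.Dict.getD, PySem.Dict.get?]
      rw [hd2, hitems, List.find?_append, pv_find?_keyed_of_not_mem _ _ _ hK]
      simp
    unfold pvIns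
    rw [if_neg (by simp [hcont])]
    show PySem.Dict.modify _ _ _ _ = _
    unfold PySem.Dict.modify
    rw [hget2]
    have hins : ∀ (d : PySem.Dict Int (List (Nat × Nat))) (k : Int) (v),
        d.contains k = true →
        (d.insert k v).items = d.items.map (fun q => if q.1 == k then (k, v) else q) := by
      intro d k v h
      unfold PySem.Dict.insert
      rw [if_pos h]
    apply PySem.Dict.ext
    rw [hins _ _ _ hcont2, hd2, List.map_append]
    have hq1 : ∀ q ∈ (pvDinv l).items, (q.1 == pvKey p) = false := by
      intro q hq
      rcases List.mem_map.mp hq with ⟨k, hk, rfl⟩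
      simp only [beq_eq_false_iff_ne, ne_eq]
      exact fun h : k = pvKey p => hK (h ▸ hk)
    have hfirst : List.map (fun q => if q.1 == pvKey p then (pvKey p, (fun l => l ++ [p]) []) else q)
        (pvDinv l).items = (pvDinv l).items := by
      have := List.map_congr_left (l := (pvDinv l).items)
        (f := fun q => if q.1 == pvKey p then (pvKey p, (fun l => l ++ [p]) []) else q)
        (g := id) (fun a ha => by simp only [hq1 a ha]; simp)
      simpa using this
    rw [hfirst]
    show _ = (pvDinv (l ++ [p])).items
    unfold pvDinv
    show _ = List.map _ (PySem.List.dedup (List.map pvKey (l ++ [p])))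
    rw [List.map_append]
    simp only [List.map_cons, List.map_nil]
    rw [pv_dedup_append, if_neg hmem, List.map_append]
    simp only [List.map_cons, List.map_nil]
    have hsecond : List.map (fun k => (k, List.filter (fun q => pvKey q == k) (l ++ [p])))
        (PySem.List.dedup (List.map pvKey l))
        = List.map (fun k => (k, List.filter (fun q => pvKey q == k) l))
          (PySem.List.dedup (List.map pvKey l)) := by
      apply List.map_congr_left
      intro k hk
      have h2 : (pvKey p == k) = false := by
        simp only [beq_eq_false_iff_ne, ne_eq]
        exact fun h : pvKey p = k => hK (h ▸ hk)
      simp [List.filter_append, h2]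
    have hnil : List.filter (fun q => pvKey q == pvKey p) l = [] := by
      rw [List.filter_eq_nil_iff]
      intro a ha
      simp only [beq_iff_eq]
      exact fun h => hmem (h ▸ List.mem_map_of_mem ha)
    rw [hsecond]
    simp [List.filter_append, hnil]

theorem pv_dict_inv (l : List (Nat × Nat)) : l.foldl pvIns PySem.Dict.empty = pvDinv l := by
  induction l using List.reverseRecOn with
  | nil => rfl
  | append_singleton l p ih =>
    rw [List.foldl_append, List.foldl_cons, List.foldl_nil, ih, pv_dict_step]

-- ---- sorted2 is the identity on the (already row-sorted) diagonal cell lists ----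
theorem pv_sorted2_insert_aux (l acc : List (Nat × Nat))
    (h : (acc ++ l).Pairwise (fun a b => a.1 < b.1)) :
    l.foldl (fun acc x => PySem.List.insertBy
      (fun a b => decide (a.1 < b.1) || (!decide (b.1 < a.1) && decide (a.2 < b.2))) x acc) acc
      = acc ++ l := by
  induction l generalizing acc with
  | nil => simp
  | cons x l ih =>
    have hx : ∀ y ∈ acc, (decide (x.1 < y.1) || (!decide (y.1 < x.1) && decide (x.2 < y.2))) = false := by
      intro y hy
      have hyx : y.1 < x.1 := by
        have := (List.pairwise_append.mp h).2.2 y hy x List.mem_cons_self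
        exact this
      simp [Nat.lt_asymm hyx, hyx]
    rw [List.foldl_cons, PySem.List.insertBy_of_forall_not_before _ _ _ hx]
    have h' : ((acc ++ [x]) ++ l).Pairwise (fun a b => a.1 < b.1) := by
      simpa using h
    simpa using ih (acc ++ [x]) h'

theorem pv_sorted2_eq_self (l : List (Nat × Nat)) (h : l.Pairwise (fun a b => a.1 < b.1)) :
    PySem.List.sorted2 l (fun p => p.1) (fun p => p.2) false = l := by
  have := pv_sorted2_insert_aux l [] (by simpa using h)
  simpa [PySem.List.sorted2] using this

-- ---- structure of pvP ----
theorem pv_mem_rowP (grid : List (List Int)) (cols r : Nat) (p : Nat × Nat) :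
    p ∈ pvRowP grid cols r ↔ p.1 = r ∧ p.2 < cols ∧ pvCell grid r p.2 ≠ 0 := by
  rcases p with ⟨a, b⟩
  simp only [pvRowP, List.mem_map, List.mem_filter, List.mem_range, decide_not,
    Prod.mk.injEq, Bool.not_eq_eq_eq_not, Bool.not_true, decide_eq_false_iff_not]
  constructor
  · rintro ⟨c, ⟨hc, hcell⟩, h1, h2⟩; subst h1; subst h2; exact ⟨rfl, hc, hcell⟩
  · rintro ⟨h1, h2, h3⟩; exact ⟨b, ⟨h2, h3⟩, h1.symm, rfl⟩

theorem pv_mem_Ppre (grid : List (List Int)) (cols r : Nat) (p : Nat × Nat) :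
    p ∈ pvPpre grid cols r ↔ p.1 < r ∧ p.2 < cols ∧ pvCell grid p.1 p.2 ≠ 0 := by
  simp only [pvPpre, List.mem_flatMap, List.mem_range]
  constructor
  · rintro ⟨a, ha, hp⟩
    rcases (pv_mem_rowP grid cols a p).mp hp with ⟨h1, h2, h3⟩
    exact ⟨h1 ▸ ha, h2, by rwa [h1]⟩
  · rintro ⟨h1, h2, h3⟩
    exact ⟨p.1, h1, (pv_mem_rowP grid cols p.1 p).mpr ⟨rfl, h2, h3⟩⟩

theorem pv_P_pairwise (grid : List (List Int)) (cols r : Nat) :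
    (pvPpre grid cols r).Pairwise (fun p q => p.1 < q.1 ∨ (p.1 = q.1 ∧ p.2 < q.2)) := by
  unfold pvPpre
  rw [List.pairwise_flatMap]
  constructor
  · intro a _
    unfold pvRowP
    apply List.Pairwise.map
    · intro c c' (hcc : c < c')
      exact Or.inr ⟨rfl, hcc⟩
    · exact List.Pairwise.filter _ (List.pairwise_lt_range)
  · apply List.Pairwise.imp_of_mem (R := fun a b => a < b)
    · intro a b _ _ hab p hp q hq
      have h1 := ((pv_mem_rowP grid cols a p).mp hp).1
      have h2 := ((pv_mem_rowP grid cols b q).mp hq).1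
      exact Or.inl (h1 ▸ h2 ▸ hab)
    · exact List.pairwise_lt_range

theorem pv_filter_pairwise (grid : List (List Int)) (cols r : Nat) (k : Int) :
    ((pvPpre grid cols r).filter (fun q => pvKey q == k)).Pairwise (fun a b => a.1 < b.1) := by
  have h := (pv_P_pairwise grid cols r).filter (fun q => pvKey q == k)
  apply List.Pairwise.imp_of_mem (R := fun p q => (p.1 < q.1 ∨ (p.1 = q.1 ∧ p.2 < q.2)))
  · intro a b ha hb hab
    rcases hab with h' | ⟨h1, h2⟩
    · exact h'
    · exfalso
      have hka : pvKey a = k := by simpa using (List.mem_filter.mp ha).2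
      have hkb : pvKey b = k := by simpa using (List.mem_filter.mp hb).2
      have : (a.2 : Int) = (b.2 : Int) := by
        have := hka.trans hkb.symm
        unfold pvKey at this
        omega
      omega
  · exact h

-- ---- membership in pvOdd ----
theorem pv_mem_of_mem_filter_enum (l : List (Nat × Nat)) (s : Int) (p : Int × (Nat × Nat) → Bool)
    (x : Nat × Nat) (h : x ∈ (List.filter p (PySem.List.enumerate l s)).map (fun ic => ic.2)) :
    x ∈ l := by
  rcases List.mem_map.mp h with ⟨ic, hic, hx⟩
  have hmem : ic ∈ PySem.List.enumerate l s := List.mem_filter.mp hic |>.1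
  rcases (PySem.List.mem_enumerate_iff _ _ _).mp hmem with ⟨k, hk, rfl⟩
  exact hx ▸ List.getElem_mem hk

theorem pv_mem_of_mem_pvOdd (l : List (Nat × Nat)) (x : Nat × Nat) (h : x ∈ pvOdd l) : x ∈ l :=
  pv_mem_of_mem_filter_enum l 0 _ x h

theorem pv_mem_pvOdd_split (l₁ l₂ : List (Nat × Nat)) (x : Nat × Nat)
    (h1 : x ∉ l₁) (h2 : x ∉ l₂) :
    (x ∈ pvOdd (l₁ ++ x :: l₂) ↔ l₁.length % 2 = 1) := by
  unfold pvOdd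
  rw [PySem.List.enumerate_append, PySem.List.enumerate_cons]
  simp only [List.filter_append, List.map_append, List.mem_append, List.filter_cons]
  have hpar : (((0 + (l₁.length : Int)) % 2 == 1) = true) ↔ l₁.length % 2 = 1 := by
    simp only [beq_iff_eq, zero_add]; omega
  constructor
  · rintro (h | h)
    · exact absurd (pv_mem_of_mem_filter_enum _ _ _ _ h) h1
    · by_cases hp : ((0 + (l₁.length : Int)) % 2 == 1) = true
      · exact hpar.mp hp
      · rw [if_neg hp] at h
        exact absurd (pv_mem_of_mem_filter_enum _ _ _ _ h) h2
  · intro h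
    refine Or.inr ?_
    rw [if_pos (hpar.mpr h)]
    exact List.mem_map.mpr ⟨((0 : Int) + l₁.length, x), List.mem_cons_self, rfl⟩

-- ---- the split of pvP around a marked cell ----
theorem pv_P_split (grid : List (List Int)) (cols r c : Nat)
    (hr : r < grid.length) (hc : c < cols) (hcell : pvCell grid r c ≠ 0) :
    ∃ L₁ L₂ : List (Nat × Nat),
      pvP grid cols = L₁ ++ (r, c) :: L₂ ∧ (r, c) ∉ L₁ ∧ (r, c) ∉ L₂ ∧
      L₁.countP (fun q => pvKey q == pvKey (r, c)) = pvPrior grid cols r c := by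
  have hrange : List.range grid.length
      = List.range r ++ r :: (List.range (grid.length - r - 1)).map (fun x => r + (x + 1)) := by
    have h1 : grid.length = r + (grid.length - r) := by omega
    have h2 : grid.length - r = (grid.length - r - 1) + 1 := by omega
    rw [h1, List.range_add, h2, List.range_succ_eq_map]
    simp [List.map_map, Function.comp_def, Nat.add_comm]
  have hcrange : List.range cols
      = List.range c ++ c :: (List.range (cols - c - 1)).map (fun x => c + (x + 1)) := by
    have h1 : cols = c + (cols - c) := by omega
    have h2 : cols - c = (cols - c - 1) + 1 := by omega
    rw [h1, List.range_add, h2, List.range_succ_eq_map]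
    simp [List.map_map, Function.comp_def, Nat.add_comm]
  have hrowP : pvRowP grid cols r
      = ((List.range c).filter (fun c' => pvCell grid r c' ≠ 0)).map (fun c' => (r, c'))
        ++ (r, c) ::
        (((List.range (cols - c - 1)).map (fun x => c + (x + 1))).filter
            (fun c' => pvCell grid r c' ≠ 0)).map (fun c' => (r, c')) := by
    unfold pvRowP
    rw [hcrange, List.filter_append, List.filter_cons]
    rw [if_pos (by simpa using hcell)]
    simp
  refine ⟨pvPpre grid cols r
      ++ ((List.range c).filter (fun c' => pvCell grid r c' ≠ 0)).map (fun c' => (r, c')),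
    (((List.range (cols - c - 1)).map (fun x => c + (x + 1))).filter
        (fun c' => pvCell grid r c' ≠ 0)).map (fun c' => (r, c'))
      ++ (r :: (List.range (grid.length - r - 1)).map (fun x => r + (x + 1))).tail.flatMap
          (pvRowP grid cols), ?_, ?_, ?_, ?_⟩
  · show pvP grid cols = _
    unfold pvP pvPpre
    rw [hrange, List.flatMap_append, List.flatMap_cons, hrowP]
    simp [List.append_assoc]
  · intro hmem
    rcases List.mem_append.mp hmem with h | h
    · have := ((pv_mem_Ppre grid cols r (r, c)).mp h).1
      omega
    · rcases List.mem_map.mp h with ⟨c', hc', heq⟩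
      have : c' < c := List.mem_range.mp (List.mem_filter.mp hc').1
      have : c' = c := by have := congrArg Prod.snd heq; simpa using this
      omega
  · intro hmem
    rcases List.mem_append.mp hmem with h | h
    · rcases List.mem_map.mp h with ⟨c', hc', heq⟩
      rcases List.mem_map.mp (List.mem_filter.mp hc').1 with ⟨x, _, hx⟩
      have : c' = c := by have := congrArg Prod.snd heq; simpa using this
      omega
    · simp only [List.tail_cons, List.mem_flatMap, List.mem_map] at h
      rcases h with ⟨a, ⟨x, _, hx⟩, hmem'⟩
      have := ((pv_mem_rowP grid cols a (r, c)).mp hmem').1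
      omega
  · rw [List.countP_append]
    have h0 : (((List.range c).filter (fun c' => pvCell grid r c' ≠ 0)).map
        (fun c' => (r, c'))).countP (fun q => pvKey q == pvKey (r, c)) = 0 := by
      rw [List.countP_eq_zero]
      intro a ha
      rcases List.mem_map.mp ha with ⟨c', hc', heq⟩
      have hlt : c' < c := List.mem_range.mp (List.mem_filter.mp hc').1
      subst heq
      simp only [pvKey, beq_iff_eq]
      intro h'
      omega
    rw [h0]
    rfl

theorem pv_mem_U (grid : List (List Int)) (cols : Nat) (r c : Nat) :
    ((r, c) ∈ pvU grid cols ↔ r < grid.length ∧ c < cols ∧ pvMark grid cols r c = true) := by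
  unfold pvU
  simp only [List.mem_flatMap, PySem.List.mem_dedup, List.mem_map]
  constructor
  · rintro ⟨k, _, hmem⟩
    have hinl : (r, c) ∈ (pvP grid cols).filter (fun q => pvKey q == k) :=
      pv_mem_of_mem_pvOdd _ _ hmem
    have hP : (r, c) ∈ pvP grid cols := (List.mem_filter.mp hinl).1
    have hkey : pvKey (r, c) = k := by simpa using (List.mem_filter.mp hinl).2
    obtain ⟨hr, hc, hcell⟩ := (pv_mem_Ppre grid cols grid.length (r, c)).mp hP
    obtain ⟨L₁, L₂, hsplit, hn1, hn2, hcount⟩ := pv_P_split grid cols r c hr hc hcell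
    subst hkey
    rw [hsplit, List.filter_append, List.filter_cons,
      if_pos (by simp)] at hmem
    have hpar := (pv_mem_pvOdd_split
      (L₁.filter (fun q => pvKey q == pvKey (r, c)))
      (L₂.filter (fun q => pvKey q == pvKey (r, c))) (r, c)
      (fun h => hn1 (List.mem_filter.mp h).1)
      (fun h => hn2 (List.mem_filter.mp h).1)).mp hmem
    rw [List.countP_eq_length_filter.symm, hcount] at hpar
    exact ⟨hr, hc, by simp [pvMark, hcell, hpar]⟩
  · rintro ⟨hr, hc, hm⟩
    have hcell : pvCell grid r c ≠ 0 := by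
      intro h; simp [pvMark, h] at hm
    have hpar : pvPrior grid cols r c % 2 = 1 := by
      simp only [pvMark, Bool.and_eq_true, beq_iff_eq] at hm; exact hm.2
    have hP : (r, c) ∈ pvP grid cols :=
      (pv_mem_Ppre grid cols grid.length (r, c)).mpr ⟨hr, hc, hcell⟩
    obtain ⟨L₁, L₂, hsplit, hn1, hn2, hcount⟩ := pv_P_split grid cols r c hr hc hcell
    refine ⟨pvKey (r, c), ⟨(r, c), hP, rfl⟩, ?_⟩
    rw [hsplit, List.filter_append, List.filter_cons, if_pos (by simp)]
    apply (pv_mem_pvOdd_split _ _ (r, c)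
      (fun h => hn1 (List.mem_filter.mp h).1)
      (fun h => hn2 (List.mem_filter.mp h).1)).mpr
    rw [List.countP_eq_length_filter.symm, hcount]
    exact hpar

-- ---- pvSetAll pointwise description ----
theorem pv_getD_set4 (o : List (List Int)) (a b r : Nat) :
    (pvSet4 o a b).getD r [] = if r = a then (o.getD a []).set b 4 else o.getD r [] := by
  unfold pvSet4
  rcases Nat.lt_or_ge a o.length with ha | ha
  · by_cases h : r = a
    · subst h; simp [List.getD_eq_getElem?_getD, ha]
    · rw [if_neg h, List.getD_eq_getElem?_getD, List.getElem?_set,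
        if_neg (show ¬a = r from fun h' => h h'.symm), ← List.getD_eq_getElem?_getD]
  · rw [List.set_eq_of_length_le (by omega)]
    by_cases h : r = a
    · subst h
      rw [if_pos rfl, List.getD_eq_getElem?_getD, List.getElem?_eq_none (by omega)]
      simp [List.set_eq_of_length_le]
    · rw [if_neg h]

theorem pv_getD_set_int (row : List Int) (b c : Nat) :
    (row.set b 4).getD c 0 = if b = c ∧ b < row.length then 4 else row.getD c 0 := by
  rw [List.getD_eq_getElem?_getD, List.getElem?_set]
  by_cases h : b = c
  · subst h
    by_cases hb : b < row.length
    · simp [hb]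
    · simp [hb, List.getD_eq_getElem?_getD]
  · simp [h, List.getD_eq_getElem?_getD]

theorem pv_setAll_length (U : List (Nat × Nat)) (o : List (List Int)) :
    (pvSetAll o U).length = o.length := by
  induction U generalizing o with
  | nil => rfl
  | cons p U ih =>
    show (pvSetAll (pvSet4 o p.1 p.2) U).length = o.length
    rw [ih]; simp [pvSet4]

theorem pv_setAll_rowlen (U : List (Nat × Nat)) (o : List (List Int)) (r : Nat) :
    ((pvSetAll o U).getD r []).length = (o.getD r []).length := by
  induction U generalizing o with
  | nil => rfl
  | cons p U ih =>
    show ((pvSetAll (pvSet4 o p.1 p.2) U).getD r []).length = (o.getD r []).length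
    rw [ih, pv_getD_set4]
    by_cases h : r = p.1
    · subst h; simp
    · rw [if_neg h]

theorem pv_setAll_cell (U : List (Nat × Nat)) (o : List (List Int)) (r c : Nat) :
    ((pvSetAll o U).getD r []).getD c 0 =
      if (r, c) ∈ U ∧ r < o.length ∧ c < (o.getD r []).length then 4
      else (o.getD r []).getD c 0 := by
  induction U generalizing o with
  | nil => simp [pvSetAll]
  | cons p U ih =>
    rcases p with ⟨a, b⟩
    show ((pvSetAll (pvSet4 o a b) U).getD r []).getD c 0 = _
    rw [ih]
    have hlen : (pvSet4 o a b).length = o.length := by simp [pvSet4]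
    have hrowlen : ∀ r', ((pvSet4 o a b).getD r' []).length = (o.getD r' []).length := by
      intro r'
      rw [pv_getD_set4]
      by_cases h : r' = a
      · subst h; simp
      · rw [if_neg h]
    rw [hlen, hrowlen]
    have hval : ((pvSet4 o a b).getD r []).getD c 0
        = if r = a ∧ b = c ∧ b < (o.getD a []).length then 4 else (o.getD r []).getD c 0 := by
      rw [pv_getD_set4]
      by_cases h : r = a
      · subst h
        rw [if_pos rfl, pv_getD_set_int]
        by_cases h2 : b = c ∧ b < (o.getD r []).length
        · simp [h2]
        · rw [if_neg h2, if_neg (fun hcon => h2 ⟨hcon.2.1, hcon.2.2⟩)]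
      · rw [if_neg h, if_neg (fun hcon => h hcon.1)]
    rw [hval]
    simp only [List.mem_cons, Prod.mk.injEq]
    by_cases hra : r = a
    · subst hra
      by_cases hbc : b = c
      · subst hbc
        by_cases hb : b < (o.getD r []).length
        · by_cases hrl : r < o.length <;> by_cases hU : (r, b) ∈ U <;>
            (simp only [List.getD_eq_getElem?_getD] at hb ⊢; simp [hrl, hU];
              try (intro h1 h2; omega))
        · by_cases hU : (r, b) ∈ U <;>
            (simp only [List.getD_eq_getElem?_getD] at hb ⊢; simp [hb, hU])
      · by_cases hU : (r, c) ∈ U <;>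
          simp [hbc, hU, show ¬c = b from fun h => hbc h.symm]
    · by_cases hU : (r, c) ∈ U <;>
        simp [hra, hU]

-- ---- A equals the reference ----
theorem pv_A_eq_setAll (grid : List (List Int)) :
    solve_a5f85a15 grid = pvSetAll grid (pvU grid (grid.headD []).length) := by
  unfold solve_a5f85a15
  dsimp only []
  have h1 : (List.range grid.length).foldl (fun d r =>
      (List.range (grid.headD []).length).foldl (fun d c =>
        if (grid.getD r []).getD c 0 ≠ 0 then
          (if d.contains ((r : Int) - (c : Int)) then d
           else d.insert ((r : Int) - (c : Int)) []).modify ((r : Int) - (c : Int)) []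
            (fun l => l ++ [(r, c)])
        else d) d) PySem.Dict.empty
      = (pvP grid (grid.headD []).length).foldl pvIns PySem.Dict.empty := by
    have hinner : ∀ (r : Nat) (d : PySem.Dict Int (List (Nat × Nat))),
        (List.range (grid.headD []).length).foldl (fun d c =>
          if (grid.getD r []).getD c 0 ≠ 0 then
            (if d.contains ((r : Int) - (c : Int)) then d
             else d.insert ((r : Int) - (c : Int)) []).modify ((r : Int) - (c : Int)) []
              (fun l => l ++ [(r, c)])
          else d) d
        = (pvRowP grid (grid.headD []).length r).foldl pvIns d := by
      intro r d
      rw [PySem.List.foldl_ite_eq_foldl_filter]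
      unfold pvRowP
      rw [List.foldl_map]
      rfl
    calc (List.range grid.length).foldl _ PySem.Dict.empty
        = (List.range grid.length).foldl (fun d r =>
            (pvRowP grid (grid.headD []).length r).foldl pvIns d) PySem.Dict.empty := by
          exact PySem.List.foldl_congr_mem _ _ _ _ (fun d r _ => hinner r d)
      _ = (pvP grid (grid.headD []).length).foldl pvIns PySem.Dict.empty := by
          rw [pvP, pvPpre, List.foldl_flatMap]
  rw [h1, pv_dict_inv]
  have h2 : ∀ (out : List (List Int)), ∀ kc ∈ (pvDinv (pvP grid (grid.headD []).length)).items,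
      (PySem.List.enumerate
          (PySem.List.sorted2 kc.2 (fun p => p.1) (fun p => p.2) false) 0).foldl
        (fun out ic => if ic.1 % 2 == 1 then pvSet4 out ic.2.1 ic.2.2 else out) out
      = (pvOdd kc.2).foldl (fun out p => pvSet4 out p.1 p.2) out := by
    intro out kc hkc
    have hkc2 : kc.2.Pairwise (fun a b => a.1 < b.1) := by
      rcases List.mem_map.mp (show kc ∈ List.map
          (fun k => (k, List.filter (fun q => pvKey q == k) (pvP grid (grid.headD []).length)))
          (PySem.List.dedup ((pvP grid (grid.headD []).length).map pvKey)) from hkc)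
        with ⟨k, _, rfl⟩
      exact pv_filter_pairwise grid (grid.headD []).length grid.length k
    rw [pv_sorted2_eq_self _ hkc2]
    calc List.foldl (fun out ic => if ic.1 % 2 == 1 then pvSet4 out ic.2.1 ic.2.2 else out) out
          (PySem.List.enumerate kc.2 0)
        = List.foldl (fun out ic => pvSet4 out ic.2.1 ic.2.2) out
            ((PySem.List.enumerate kc.2 0).filter (fun ic => ic.1 % 2 == 1)) :=
          PySem.List.foldl_if_eq_foldl_filter _ _ _ _
      _ = (pvOdd kc.2).foldl (fun out p => pvSet4 out p.1 p.2) out := by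
          rw [pvOdd, List.foldl_map]
  rw [PySem.List.foldl_congr_mem _ _
    (fun out kc => (pvOdd kc.2).foldl (fun out p => pvSet4 out p.1 p.2) out) grid h2]
  show List.foldl _ grid (List.map
      (fun k => (k, List.filter (fun q => pvKey q == k) (pvP grid (grid.headD []).length)))
      (PySem.List.dedup ((pvP grid (grid.headD []).length).map pvKey))) = _
  rw [← List.foldl_flatMap, List.flatMap_map]
  rfl

theorem pv_getD_eq_getElem_rows (L : List (List Int)) (i : Nat) (h : i < L.length) :
    L.getD i [] = L[i] := by
  rw [List.getD_eq_getElem?_getD, List.getElem?_eq_getElem h]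
  rfl

theorem pv_getD_eq_getElem_cell (L : List Int) (i : Nat) (h : i < L.length) :
    L.getD i 0 = L[i] := by
  rw [List.getD_eq_getElem?_getD, List.getElem?_eq_getElem h]
  rfl

theorem pv_A_eq_ref (grid : List (List Int)) (hpre : Pre_solve_a5f85a15 grid) :
    solve_a5f85a15 grid = pvRef grid := by
  obtain ⟨hne, hlenall⟩ := hpre
  rw [pv_A_eq_setAll]
  apply List.ext_getElem
  · rw [pv_setAll_length]
    simp [pvRef]
  intro r h1 h2
  have hr : r < grid.length := by rwa [pv_setAll_length] at h1
  have hgr : grid.getD r [] = grid[r] := pv_getD_eq_getElem_rows grid r hr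
  have hcols : (grid.headD []).length ≤ grid[r].length := hlenall grid[r] (List.getElem_mem hr)
  apply List.ext_getElem
  · rw [← pv_getD_eq_getElem_rows _ _ h1, pv_setAll_rowlen, hgr]
    simp [pvRef, pvMrow]
  intro c hc1 hc2
  have hc2' : c < grid[r].length := by
    simpa [pvRef, pvMrow] using hc2
  rw [← pv_getD_eq_getElem_cell _ _ hc1, ← pv_getD_eq_getElem_rows _ _ h1, pv_setAll_cell,
    ← pv_getD_eq_getElem_cell _ _ hc2, ← pv_getD_eq_getElem_rows _ _ h2]
  have hrefrow : (pvRef grid).getD r [] = pvMrow grid (grid.headD []).length r grid[r] := by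
    rw [pv_getD_eq_getElem_rows _ _ h2]
    simp [pvRef]
  rw [hrefrow]
  have hmlen : c < (pvMrow grid (grid.headD []).length r grid[r]).length := by
    simpa [pvMrow] using hc2'
  have hrefcell : (pvMrow grid (grid.headD []).length r grid[r]).getD c 0
      = if c < (grid.headD []).length ∧ pvMark grid (grid.headD []).length r c = true then 4
        else grid[r].getD c 0 := by
    rw [pv_getD_eq_getElem_cell _ _ hmlen]
    simp only [pvMrow, List.getElem_mapIdx]
    by_cases hm : c < (grid.headD []).length ∧ pvMark grid (grid.headD []).length r c = true
    · rw [if_pos hm, if_pos hm]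
    · rw [if_neg hm, if_neg hm, pv_getD_eq_getElem_cell _ _ hc2']
  rw [hrefcell]
  by_cases hm : c < (grid.headD []).length ∧ pvMark grid (grid.headD []).length r c = true
  · have hcr : c < (grid.getD r []).length := by
      rw [hgr]; omega
    rw [if_pos ⟨(pv_mem_U grid (grid.headD []).length r c).mpr ⟨hr, hm.1, hm.2⟩, hr, hcr⟩,
      if_pos hm]
  · rw [if_neg, if_neg hm]
    · rw [hgr]
    · rintro ⟨hU, _, _⟩
      obtain ⟨_, hb, hmk⟩ := (pv_mem_U grid (grid.headD []).length r c).mp hU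
      exact hm ⟨hb, hmk⟩

-- ---- B equals the reference ----
def pvRowPn (grid : List (List Int)) (r n : Nat) : List (Nat × Nat) :=
  ((List.range n).filter (fun c => pvCell grid r c ≠ 0)).map (fun c => (r, c))

def pvBstep (r : Nat) (row : List Int) (st2 : PySem.Dict Int Int × List Int) (c : Nat) :
    PySem.Dict Int Int × List Int :=
  if row.getD c 0 ≠ 0 then
    let k : Int := (r : Int) - (c : Int)
    let counts := st2.1.insert k (st2.1.getD k 0 + 1)
    (counts, if counts.getD k 0 % 2 == 0 then st2.2.set c 4 else st2.2)
  else st2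

def pvBouter (cols : Nat) (st : PySem.Dict Int Int × List (List Int)) (rp : Int × List Int) :
    PySem.Dict Int Int × List (List Int) :=
  let inner := (List.range cols).foldl (fun st2 (c : Nat) =>
    if rp.2.getD c 0 ≠ 0 then
      let k : Int := rp.1 - (c : Int)
      let counts := st2.1.insert k (st2.1.getD k 0 + 1)
      (counts, if counts.getD k 0 % 2 == 0 then st2.2.set c 4 else st2.2)
    else st2) (st.1, rp.2)
  (inner.1, st.2 ++ [inner.2])

theorem pv_B_row (grid : List (List Int)) (cols r : Nat) (row : List Int)
    (hrow : grid.getD r [] = row) (hlen : cols ≤ row.length)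
    (counts : PySem.Dict Int Int)
    (hcounts : ∀ k, counts.getD k 0 = ((pvPpre grid cols r).countP (fun q => pvKey q == k) : Int))
    (n : Nat) (hn : n ≤ cols) :
    (∀ k, ((List.range n).foldl (pvBstep r row) (counts, row)).1.getD k 0
        = (((pvPpre grid cols r ++ pvRowPn grid r n).countP (fun q => pvKey q == k) : Nat) : Int))
    ∧ ((List.range n).foldl (pvBstep r row) (counts, row)).2
        = row.mapIdx (fun c v => if c < n ∧ pvMark grid cols r c = true then 4 else v) := by
  induction n with
  | zero =>
    refine ⟨fun k => by simpa [pvRowPn] using hcounts k, ?_⟩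
    apply List.ext_getElem (by simp)
    intro i hi1 hi2
    simp [List.getElem_mapIdx]
  | succ n ih =>
    obtain ⟨ih1, ih2⟩ := ih (by omega)
    rw [List.range_succ, List.foldl_append, List.foldl_cons, List.foldl_nil]
    have hcell : row.getD n 0 = pvCell grid r n := by rw [pvCell, hrow]
    have hnlen : n < row.length := by omega
    by_cases hz : pvCell grid r n ≠ 0
    · -- non-zero cell at column n
      have hstep : pvBstep r row ((List.range n).foldl (pvBstep r row) (counts, row)) n
          = (((List.range n).foldl (pvBstep r row) (counts, row)).1.insert ((r : Int) - (n : Int))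
              ((((List.range n).foldl (pvBstep r row) (counts, row)).1.getD ((r : Int) - (n : Int)) 0) + 1),
             if (((List.range n).foldl (pvBstep r row) (counts, row)).1.getD ((r : Int) - (n : Int)) 0 + 1) % 2 == 0
             then ((List.range n).foldl (pvBstep r row) (counts, row)).2.set n 4
             else ((List.range n).foldl (pvBstep r row) (counts, row)).2) := by
        rw [pvBstep, if_pos (by rw [hcell]; exact hz)]
        simp [PySem.Dict.getD_insert_self]
      rw [hstep]
      have hrowPn : pvRowPn grid r (n + 1) = pvRowPn grid r n ++ [(r, n)] := by
        rw [pvRowPn, pvRowPn, List.range_succ, List.filter_append, List.filter_cons,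
          if_pos (by simpa using hz)]
        simp
      have hprior : (((List.range n).foldl (pvBstep r row) (counts, row)).1.getD ((r : Int) - (n : Int)) 0)
          = (pvPrior grid cols r n : Int) := by
        rw [ih1]
        have h0 : (pvRowPn grid r n).countP (fun q => pvKey q == (r : Int) - (n : Int)) = 0 := by
          rw [List.countP_eq_zero]
          intro a ha
          rcases List.mem_map.mp ha with ⟨c', hc', rfl⟩
          have : c' < n := List.mem_range.mp (List.mem_filter.mp hc').1
          simp only [pvKey, beq_iff_eq]
          intro h'
          omega
        rw [List.countP_append, h0]
        rfl
      constructor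
      · intro k
        by_cases hk : k = (r : Int) - (n : Int)
        · subst hk
          rw [PySem.Dict.getD_insert_self, hprior, hrowPn, ← List.append_assoc,
            List.countP_append, List.countP_append]
          have h1 : List.countP (fun q => pvKey q == (r : Int) - (n : Int)) [(r, n)] = 1 := by
            simp [pvKey]
          have h0 : (pvRowPn grid r n).countP (fun q => pvKey q == (r : Int) - (n : Int)) = 0 := by
            rw [List.countP_eq_zero]
            intro a ha
            rcases List.mem_map.mp ha with ⟨c', hc', rfl⟩
            have : c' < n := List.mem_range.mp (List.mem_filter.mp hc').1
            simp only [pvKey, beq_iff_eq]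
            intro h'
            omega
          rw [h1, h0]
          have h2 : pvPrior grid cols r n
              = List.countP (fun q => pvKey q == (r : Int) - (n : Int)) (pvPpre grid cols r) := rfl
          rw [h2]
          push_cast
          ring
        · rw [PySem.Dict.getD_insert_of_ne _ _ _ hk, ih1 k, hrowPn,
            ← List.append_assoc, List.countP_append, List.countP_append]
          have : List.countP (fun q => pvKey q == k) [(r, n)] = 0 := by
            simp only [List.countP_cons, List.countP_nil]
            have : (pvKey (r, n) == k) = false := by
              simp only [beq_eq_false_iff_ne, ne_eq, pvKey]
              exact fun h => hk (by simpa using h.symm)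
            simp [this]
          rw [this, List.countP_append]
          push_cast
          ring
      · rw [hprior]
        have hmark : pvMark grid cols r n = ((pvPrior grid cols r n % 2 : Nat) == 1) := by
          simp [pvMark, hz]
        by_cases hodd : pvPrior grid cols r n % 2 = 1
        · rw [if_pos (by simp only [beq_iff_eq]; omega), ih2]
          apply List.ext_getElem (by simp)
          intro i hi1 hi2
          simp only [List.getElem_set, List.getElem_mapIdx]
          by_cases hin : n = i
          · subst hin
            rw [if_pos rfl, if_pos ⟨by omega, by rw [hmark]; simp [hodd]⟩]
          · rw [if_neg hin]
            have : i < n ∨ ¬i < n := by omega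
            by_cases hi : i < n
            · simp [hi, show i < n + 1 by omega]
            · rw [if_neg (by intro h; exact hi h.1), if_neg
                (by rintro ⟨h1, _⟩; omega)]
        · rw [if_neg (by simp only [beq_iff_eq]; omega), ih2]
          apply List.ext_getElem (by simp)
          intro i hi1 hi2
          simp only [List.getElem_mapIdx]
          by_cases hi : i < n
          · simp [hi, show i < n + 1 by omega]
          · rw [if_neg (by intro h; exact hi h.1), if_neg ?_]
            rintro ⟨h1, hmk⟩
            have : i = n := by omega
            subst this
            rw [hmark] at hmk
            simp at hmk
            omega
    · -- zero cell at column n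
      have hstep : pvBstep r row ((List.range n).foldl (pvBstep r row) (counts, row)) n
          = (List.range n).foldl (pvBstep r row) (counts, row) := by
        rw [pvBstep, if_neg (by rw [hcell]; exact hz)]
      rw [hstep]
      rw [not_not] at hz
      have hrowPn : pvRowPn grid r (n + 1) = pvRowPn grid r n := by
        rw [pvRowPn, pvRowPn, List.range_succ, List.filter_append, List.filter_cons,
          if_neg (by simpa using hz)]
        simp
      refine ⟨fun k => by rw [ih1 k, hrowPn], ?_⟩
      rw [ih2]
      apply List.ext_getElem (by simp)
      intro i hi1 hi2
      simp only [List.getElem_mapIdx]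
      by_cases hi : i < n
      · simp [hi, show i < n + 1 by omega]
      · rw [if_neg (by intro h; exact hi h.1), if_neg ?_]
        rintro ⟨h1, hmk⟩
        have : i = n := by omega
        subst this
        simp [pvMark, hz] at hmk

theorem pv_B_outer (grid : List (List Int)) (cols : Nat)
    (hlen : ∀ row ∈ grid, cols ≤ row.length) :
    ∀ (rs : List (List Int)) (r : Nat), grid.drop r = rs →
    ∀ (counts : PySem.Dict Int Int),
      (∀ k, counts.getD k 0 = ((pvPpre grid cols r).countP (fun q => pvKey q == k) : Int)) →
    ∀ (acc : List (List Int)),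
      ((PySem.List.enumerate rs (r : Int)).foldl (pvBouter cols) (counts, acc)).2
        = acc ++ rs.mapIdx (fun j row => pvMrow grid cols (r + j) row) := by
  intro rs
  induction rs with
  | nil =>
    intro r _ counts _ acc
    simp [PySem.List.enumerate_nil]
  | cons row rs' ih =>
    intro r hdrop counts hc acc
    rw [PySem.List.enumerate_cons, List.foldl_cons]
    have h0 : grid[r]? = some row := by
      have := List.getElem?_drop (xs := grid) (i := r) (j := 0)
      rw [hdrop] at this
      simpa using this.symm
    have hrow : grid.getD r [] = row := by
      rw [List.getD_eq_getElem?_getD, h0]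
      rfl
    have hmem : row ∈ grid := List.mem_of_getElem? h0
    have hlenr : cols ≤ row.length := hlen row hmem
    have hstep : pvBouter cols (counts, acc) ((r : Int), row)
        = (((List.range cols).foldl (pvBstep r row) (counts, row)).1,
           acc ++ [((List.range cols).foldl (pvBstep r row) (counts, row)).2]) := rfl
    rw [hstep]
    obtain ⟨hc1, hc2⟩ := pv_B_row grid cols r row hrow hlenr counts hc cols le_rfl
    have hdrop' : grid.drop (r + 1) = rs' := by
      rw [← List.drop_drop, hdrop]
      rfl
    have hcounts' : ∀ k, (((List.range cols).foldl (pvBstep r row) (counts, row)).1).getD k 0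
        = ((pvPpre grid cols (r + 1)).countP (fun q => pvKey q == k) : Int) := by
      intro k
      rw [hc1 k]
      congr 1
      have : pvPpre grid cols (r + 1)
          = List.flatMap (pvRowP grid cols) (List.range r) ++ pvRowPn grid r cols := by
        rw [pvPpre, List.range_succ, List.flatMap_append, List.flatMap_cons, List.flatMap_nil,
          List.append_nil]
        rfl
      rw [this]
      rfl
    have hcast : (r : Int) + 1 = ((r + 1 : Nat) : Int) := by push_cast; ring
    rw [hcast, ih (r + 1) hdrop' _ hcounts' (acc ++ [((List.range cols).foldl (pvBstep r row) (counts, row)).2])]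
    rw [hc2, List.mapIdx_cons, List.append_assoc]
    congr 1
    show _ = pvMrow grid cols (r + 0) row :: _
    rw [Nat.add_zero]
    have hfun : (fun (j : Nat) (row' : List Int) => pvMrow grid cols (r + 1 + j) row')
        = (fun (j : Nat) (row' : List Int) => pvMrow grid cols (r + (j + 1)) row') := by
      funext j row'
      congr 1
      omega
    rw [hfun]
    rfl

theorem pv_B_eq_ref (grid : List (List Int)) (hpre : Pre_solve_a5f85a15 grid) :
    solve_a5f85a15_alt grid = pvRef grid := by
  obtain ⟨hne, hlenall⟩ := hpre
  show ((PySem.List.enumerate grid 0).foldl (pvBouter (grid.headD []).length)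
      (PySem.Dict.empty, [])).2 = pvRef grid
  have h0 : ((0 : Nat) : Int) = 0 := rfl
  have := pv_B_outer grid (grid.headD []).length hlenall grid 0 rfl PySem.Dict.empty
    (fun k => by simp [pvPpre, PySem.Dict.getD, PySem.Dict.get?, PySem.Dict.empty]) []
  rw [h0] at this
  rw [this]
  simp only [List.nil_append, Nat.zero_add]
  rfl

-- ===== VERDICT (by name: the statement is the Claim_ definition above) =====
theorem solve_a5f85a15_spec : Claim_equal_solve_a5f85a15 := by
  intro grid _hdom hpre
  unfold Spec_solve_a5f85a15
  rw [pv_A_eq_ref grid hpre, pv_B_eq_ref grid hpre]
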